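-- pv_equiv track=rewrite | github.com/ssec/sift | uwsift/model/layer_model.py | _get_common_timeline_of_input_layers
-- ===== SOURCE A (Python) =====
-- from typing import List, Optional, Union
--
-- def _get_common_timeline_of_input_layers(timelines_to_compare: List[dict]) -> list:
--     if len(timelines_to_compare) == 0:
--         return []
--
--     intersection = set(timelines_to_compare[-1].keys())
--     for idx in range(len(timelines_to_compare) - 1):
--         curr_timeline = timelines_to_compare[idx]
--         intersection = intersection & curr_timeline.keys()
--
--     common_times = list(intersection)
--     common_times.sort()
--     return common_times
-- ===== SOURCE B (Python) =====
-- def _get_common_timeline_of_input_layers(timelines_to_compare):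
--     n = len(timelines_to_compare)
--     counts = {}
--     for timeline in timelines_to_compare:
--         for key in timeline:
--             counts[key] = counts.get(key, 0) + 1
--     return sorted(key for key, c in counts.items() if c == n)
-- ===== Notes on version B (the rewrite author's own statement) =====
-- stated objective: alternative
-- what changed: Replaces repeated set-intersection over the dicts (seeded from the last dict, folded over the rest) by a one-pass frequency tally over all keys followed by a threshold test (count == number of dicts) and a sort.
import Mathlib
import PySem

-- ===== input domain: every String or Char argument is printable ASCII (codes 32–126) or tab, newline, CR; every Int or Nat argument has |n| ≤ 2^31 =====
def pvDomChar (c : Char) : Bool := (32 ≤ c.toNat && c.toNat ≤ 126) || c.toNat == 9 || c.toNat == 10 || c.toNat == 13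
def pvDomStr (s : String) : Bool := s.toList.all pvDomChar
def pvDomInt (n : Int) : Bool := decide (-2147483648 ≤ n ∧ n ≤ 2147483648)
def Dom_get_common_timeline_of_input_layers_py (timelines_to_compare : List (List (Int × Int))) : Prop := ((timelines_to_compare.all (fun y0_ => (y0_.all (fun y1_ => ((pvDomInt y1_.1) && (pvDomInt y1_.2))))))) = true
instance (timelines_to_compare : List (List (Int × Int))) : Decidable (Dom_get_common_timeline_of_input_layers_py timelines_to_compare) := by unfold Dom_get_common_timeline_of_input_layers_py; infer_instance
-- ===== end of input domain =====

-- ===== PORT A =====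
-- ===== PORT A =====
-- A: seed with the last dict's key set, fold set-intersection over the first n-1 dicts, sort.
def get_common_timeline_of_input_layers_py (timelines_to_compare : List (List (Int × Int))) : List Int :=
  if timelines_to_compare.length = 0 then []
  else
    let intersection : PySem.Set Int :=
      PySem.Set.ofList ((PySem.List.pyGetD timelines_to_compare (-1) []).map Prod.fst)
    let intersection :=
      (PySem.List.pyRange 0 ((timelines_to_compare.length : Int) - 1) 1).foldl
        (fun s idx =>
          let curr_timeline := PySem.List.pyGetD timelines_to_compare idx []
          PySem.Set.inter s (curr_timeline.map Prod.fst)) intersection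
    PySem.List.sorted intersection (fun x => x) false

-- ===== PORT B =====
-- B: tally every key of every dict once; keep the keys whose count equals the number of dicts; sort.
def get_common_timeline_of_input_layers_py_alt (timelines_to_compare : List (List (Int × Int))) : List Int :=
  let n : Int := timelines_to_compare.length
  let counts : PySem.Dict Int Int :=
    timelines_to_compare.foldl
      (fun d timeline =>
        (PySem.List.dedup (timeline.map Prod.fst)).foldl
          (fun d key => d.modify key 0 (· + 1)) d)
      PySem.Dict.empty
  PySem.List.sorted ((counts.items.filter (fun p => p.2 == n)).map Prod.fst) (fun x => x) false

-- ===== PRECONDITION & SPEC =====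
def Spec_get_common_timeline_of_input_layers_py (timelines_to_compare : List (List (Int × Int))) (out : List Int) : Prop := out = get_common_timeline_of_input_layers_py_alt timelines_to_compare
instance (timelines_to_compare : List (List (Int × Int))) (out : List Int) : Decidable (Spec_get_common_timeline_of_input_layers_py timelines_to_compare out) := by unfold Spec_get_common_timeline_of_input_layers_py; infer_instance

-- ===== CLAIM (what is proved, stated in full; the proofs are below) =====
def Claim_equal_get_common_timeline_of_input_layers_py : Prop := ∀ (timelines_to_compare : List (List (Int × Int))), Dom_get_common_timeline_of_input_layers_py timelines_to_compare → Spec_get_common_timeline_of_input_layers_py timelines_to_compare (get_common_timeline_of_input_layers_py timelines_to_compare)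

-- ===== LEMMAS AND PROOFS =====

theorem pv_pyGetD_neg_one {α : Type} (xs : List α) (d : α) (h : xs ≠ []) :
    PySem.List.pyGetD xs (-1) d = xs.getLast h := by
  have hl : 1 ≤ xs.length := List.length_pos_iff.mpr h
  simp only [PySem.List.pyGetD, PySem.List.pyGet?, PySem.List.pyIdx?]
  split_ifs with h1 <;> push_cast at * <;> try omega
  simp [List.getLast_eq_getElem, List.getElem?_eq_getElem (show xs.length - 1 < xs.length by omega)]

theorem pv_mem_foldl_inter {α : Type} [DecidableEq α] (l : List (List α)) (s : List α) (x : α) :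
    x ∈ l.foldl (fun s tl => PySem.Set.inter s tl) s ↔ x ∈ s ∧ ∀ tl ∈ l, x ∈ tl := by
  induction l generalizing s with
  | nil => simp
  | cons h t ih =>
    simp only [List.foldl_cons, ih, PySem.Set.mem_inter, List.mem_cons]
    constructor
    · rintro ⟨⟨hs, hh⟩, ht⟩
      exact ⟨hs, fun tl htl => htl.elim (fun e => e ▸ hh) (ht tl)⟩
    · rintro ⟨hs, hall⟩
      exact ⟨⟨hs, hall h (Or.inl rfl)⟩, fun tl htl => hall tl (Or.inr htl)⟩

theorem pv_nodup_foldl_inter {α : Type} [DecidableEq α] (l : List (List α)) (s : List α)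
    (hs : s.Nodup) : (l.foldl (fun s tl => PySem.Set.inter s tl) s).Nodup := by
  induction l generalizing s with
  | nil => exact hs
  | cons h t ih => exact ih _ (PySem.Set.nodup_inter _ _ hs)

theorem pv_foldl_flatMap {α β σ : Type} (g : α → List β) (F : σ → β → σ) (l : List α) (d : σ) :
    l.foldl (fun d a => (g a).foldl F d) d = (l.flatMap g).foldl F d := by
  induction l generalizing d with
  | nil => rfl
  | cons h t ih => simp only [List.flatMap_cons, List.foldl_append, List.foldl_cons, ih]

theorem pv_foldl_foldl_eq_counter (l : List (List (Int × Int))) :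
    l.foldl
      (fun d timeline =>
        (PySem.List.dedup (timeline.map Prod.fst)).foldl
          (fun d key => d.modify key 0 (· + 1)) d)
      PySem.Dict.empty
    = PySem.Dict.counter (l.flatMap (fun tl => PySem.List.dedup (tl.map Prod.fst))) := by
  rw [PySem.Dict.counter_eq_foldl, ← pv_foldl_flatMap]

theorem pv_count_flatMap_dedup (ts : List (List (Int × Int))) (x : Int) :
    (ts.flatMap (fun tl => PySem.List.dedup (tl.map Prod.fst))).count x
      = ts.countP (fun tl => decide (x ∈ tl.map Prod.fst)) := by
  induction ts with
  | nil => rfl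
  | cons h t ih =>
    simp only [List.flatMap_cons, List.count_append, ih, List.countP_cons]
    by_cases hx : x ∈ h.map Prod.fst
    · rw [List.count_eq_one_of_mem (PySem.List.nodup_dedup _) (by simpa using hx)]
      simp [hx]; omega
    · rw [List.count_eq_zero_of_not_mem (by simpa using hx)]
      simp [hx]

theorem pv_alt_char (ts : List (List (Int × Int))) :
    get_common_timeline_of_input_layers_py_alt ts
      = PySem.List.sorted
          ((PySem.Set.ofList (ts.flatMap (fun tl => PySem.List.dedup (tl.map Prod.fst)))).filter
            (fun k => ((ts.flatMap (fun tl => PySem.List.dedup (tl.map Prod.fst))).count k : Int) == (ts.length : Int)))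
          (fun x => x) false := by
  simp only [get_common_timeline_of_input_layers_py_alt, pv_foldl_foldl_eq_counter,
    PySem.Dict.items_counter, List.filter_map, List.map_map, Function.comp_def]
  simp

theorem pv_fold_idx (ts : List (List (Int × Int))) (init : PySem.Set Int) (h : ts ≠ []) :
    (PySem.List.pyRange 0 ((ts.length : Int) - 1) 1).foldl
      (fun s idx => PySem.Set.inter s ((PySem.List.pyGetD ts idx []).map Prod.fst)) init
    = (ts.dropLast.map (fun tl => tl.map Prod.fst)).foldl
        (fun s tl => PySem.Set.inter s tl) init := by
  have hpos : 1 ≤ ts.length := List.length_pos_iff.mpr h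
  have hlen : ((ts.length : Int) - 1) = ((ts.dropLast.length : Nat) : Int) := by
    simp only [List.length_dropLast]; omega
  rw [List.foldl_map, hlen,
    ← PySem.List.foldl_pyRange_zero_pyGetD' ts.dropLast []
      (fun s tl => PySem.Set.inter s (tl.map Prod.fst)) init]
  apply PySem.List.foldl_congr_mem
  intro acc x hx
  rw [PySem.List.mem_pyRange_one] at hx
  obtain ⟨h0, hlt⟩ := hx
  rw [PySem.List.pyGetD_of_nonneg _ _ h0, PySem.List.pyGetD_of_nonneg _ _ h0]
  have hx' : x.toNat < ts.dropLast.length := by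
    simp only [List.length_dropLast] at *; omega
  have hx'' : x.toNat < ts.length := by
    simp only [List.length_dropLast] at hx'; omega
  rw [List.getD_eq_getElem _ _ hx'', List.getD_eq_getElem _ _ hx', List.getElem_dropLast]

theorem pv_a_char (ts : List (List (Int × Int))) (h : ts ≠ []) :
    get_common_timeline_of_input_layers_py ts
      = PySem.List.sorted
          ((ts.dropLast.map (fun tl => tl.map Prod.fst)).foldl
            (fun s tl => PySem.Set.inter s tl)
            (PySem.Set.ofList ((ts.getLast h).map Prod.fst)))
          (fun x => x) false := by
  simp only [get_common_timeline_of_input_layers_py]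
  rw [if_neg (by simpa using h), pv_pyGetD_neg_one _ _ h, pv_fold_idx _ _ h]

theorem pv_forall_split (ts : List (List (Int × Int))) (h : ts ≠ []) (P : List (Int × Int) → Prop) :
    (∀ tl ∈ ts, P tl) ↔ (∀ tl ∈ ts.dropLast, P tl) ∧ P (ts.getLast h) := by
  conv_lhs => rw [← List.dropLast_append_getLast h]
  simp only [List.mem_append, List.mem_singleton]
  constructor
  · intro hp
    exact ⟨fun tl htl => hp tl (Or.inl htl), hp _ (Or.inr rfl)⟩
  · rintro ⟨hd, hl⟩ tl (htl | rfl)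
    · exact hd tl htl
    · exact hl

-- ===== VERDICT (by name: the statement is the Claim_ definition above) =====
theorem get_common_timeline_of_input_layers_py_spec : Claim_equal_get_common_timeline_of_input_layers_py := by
  intro ts _
  unfold Spec_get_common_timeline_of_input_layers_py
  by_cases h : ts = []
  · subst h; rfl
  · rw [pv_alt_char, pv_a_char ts h]
    apply PySem.List.sorted_eq_sorted_of_perm _ _ _ (fun a b hab => hab)
    rw [List.perm_ext_iff_of_nodup
      (pv_nodup_foldl_inter _ _ (PySem.Set.nodup_ofList _))
      (List.Nodup.filter _ (PySem.Set.nodup_ofList _))]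
    intro x
    rw [pv_mem_foldl_inter, PySem.Set.mem_ofList, List.mem_filter, PySem.Set.mem_ofList,
      List.mem_flatMap]
    have hall : (∀ tl ∈ ts, x ∈ tl.map Prod.fst) ↔
        (∀ tl ∈ ts.dropLast, x ∈ tl.map Prod.fst) ∧ x ∈ (ts.getLast h).map Prod.fst :=
      pv_forall_split ts h _
    have hcount : ((((ts.flatMap (fun tl => PySem.List.dedup (tl.map Prod.fst))).count x : Int))
        == (ts.length : Int)) = true ↔ ∀ tl ∈ ts, x ∈ tl.map Prod.fst := by
      rw [beq_iff_eq, Int.natCast_inj, pv_count_flatMap_dedup]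
      have hle := List.countP_eq_length
        (l := ts) (p := fun tl => decide (x ∈ tl.map Prod.fst))
      simp only [decide_eq_true_eq] at hle
      exact hle
    constructor
    · rintro ⟨hlast, hdrop⟩
      have hts : ∀ tl ∈ ts, x ∈ tl.map Prod.fst := hall.mpr ⟨fun tl htl => by
        simpa using hdrop (tl.map Prod.fst) (List.mem_map_of_mem htl), hlast⟩
      refine ⟨⟨ts.getLast h, List.getLast_mem h, by simpa using hlast⟩, hcount.mpr hts⟩
    · rintro ⟨_, hc⟩
      have hts := hcount.mp hc
      have := hall.mp hts
      exact ⟨this.2, fun tl htl => by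
        obtain ⟨tl', htl', rfl⟩ := List.mem_map.mp htl
        exact this.1 tl' htl'⟩
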